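-- pv_equiv track=rewrite | github.com/mikhailfarberov/teleparser | app/vk/lib/vk/session.py | vk_s
-- ===== SOURCE A (Python) =====
-- def splice(l, a, b, c):
--     """ JS's Array.prototype.splice
--     var x = [1, 2, 3],
--         y = x.splice(0, 2, 1337);
--     eq
--     x = [1, 2, 3]
--     x, y = splice(x, 0, 2, 1337)
--     """
--
--     return l[:a] + [c] + l[a + b:], l[a:a + b]
--
-- def vk_s_child(t, e):
--     i = len(t)
--
--     if not i:
--         return []
--
--     o = []
--     e = int(e)
--
--     for a in range(i - 1, -1, -1):
--         e = (i * (a + 1) ^ e + a) % i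
--         o.append(e)
--
--     return o[::-1]
--
-- def vk_s(t, e):
--     i = len(t)
--
--     if not i:
--         return t
--
--     o = vk_s_child(t, e)
--     t = list(t)
--
--     for a in range(1, i):
--         t, y = splice(t, o[i - 1 - a], 1, t[a])
--         t[a] = y[0]
--
--     return ''.join(t)
-- ===== SOURCE B (Python) =====
-- def vk_s(t, e):
--     i = len(t)
--     if not i:
--         return t
--     e = int(e)
--     # key schedule: js[a] is the partner index of step a (a = 1..i-1)
--     js = []
--     for m in range(i):
--         e = (i * (i - m) ^ e + (i - 1 - m)) % i
--         js.append(e)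
--
--     # the final char at position k is t[origin(k)]: trace k backwards
--     # through the transpositions (a, js[a]) from the last one to the first
--     def origin(k):
--         for a in range(i - 1, 0, -1):
--             j = js[a]
--             if k == a:
--                 k = j
--             elif k == j:
--                 k = a
--         return k
--
--     return ''.join(t[origin(k)] for k in range(i))
-- ===== Notes on version B (the rewrite author's own statement) =====
-- stated objective: alternative
-- what changed: B replaces A's sequential list mutation (splice-rebuild per step) by a pure gather: it computes the key schedule once and, for each output position independently, traces that position backwards through the schedule's transpositions to find the input character that lands there, then joins the gathered characters.
import Mathlib
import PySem

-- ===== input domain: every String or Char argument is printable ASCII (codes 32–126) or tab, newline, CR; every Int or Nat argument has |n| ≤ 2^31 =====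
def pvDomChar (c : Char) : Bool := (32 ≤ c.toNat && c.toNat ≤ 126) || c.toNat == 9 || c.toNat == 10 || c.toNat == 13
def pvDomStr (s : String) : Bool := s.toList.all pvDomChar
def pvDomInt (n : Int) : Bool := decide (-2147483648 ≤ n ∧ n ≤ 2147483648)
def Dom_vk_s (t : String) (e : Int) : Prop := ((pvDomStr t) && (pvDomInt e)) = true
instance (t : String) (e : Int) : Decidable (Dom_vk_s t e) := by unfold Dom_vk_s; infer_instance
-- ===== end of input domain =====

-- B computes the key schedule once and then, for each output position, traces that position
-- backwards through the schedule's transpositions to find which input character lands there,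
-- building the result by a gather — no list mutation at all; return values agree everywhere.

-- ===== PORT A =====
-- splice(l, a, b, c): (l[:a] + [c] + l[a+b:], l[a:a+b])
def pvSplice (l : List Char) (a b : Int) (c : Char) : List Char × List Char :=
  (PySem.List.slice l none (some a) ++ [c] ++ PySem.List.slice l (some (a + b)) none,
   PySem.List.slice l (some a) (some (a + b)))

def vk_s_child (t : String) (e : Int) : List Int :=
  let i : Int := PySem.Str.len t
  if i = 0 then []
  else
    let s := (PySem.List.pyRange (i - 1) (-1) (-1)).foldl
      (fun (s : List Int × Int) a =>
        let e' := PySem.Int.mod (PySem.Int.bxor (i * (a + 1)) (s.2 + a)) i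
        (s.1 ++ [e'], e'))
      ([], e)                                   -- e = int(e): e is already an Int
    (PySem.List.slice? s.1 none none (-1)).getD []   -- o[::-1]; step -1 ≠ 0, never none

def vk_s (t : String) (e : Int) : String :=
  let i : Int := PySem.Str.len t
  if i = 0 then t
  else
    let o := vk_s_child t e
    let res := (PySem.List.pyRange 1 i 1).foldl
      (fun (tl : List Char) a =>
        let j := PySem.List.pyGetD o (i - 1 - a) 0   -- o[i-1-a]: index provably in range, default unreachable
        let c := PySem.List.pyGetD tl a ' '          -- t[a]: a ∈ [1, i), default unreachable
        let p := pvSplice tl j 1 c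
        PySem.List.pySetD p.1 a (PySem.List.pyGetD p.2 0 ' '))  -- t[a] = y[0]; y has length 1 here
      t.toList
    String.ofList res   -- ''.join(t) over one-character strings

-- ===== PORT B =====
def vk_s_alt (t : String) (e : Int) : String :=
  let i : Int := PySem.Str.len t
  if i = 0 then t
  else
    -- key schedule js: js[a] is the partner index of step a
    let js := ((PySem.List.pyRange 0 i 1).foldl
      (fun (s : List Int × Int) m =>
        let e' := PySem.Int.mod (PySem.Int.bxor (i * (i - m)) (s.2 + (i - 1 - m))) i
        (s.1 ++ [e'], e'))
      ([], e)).1                                 -- e = int(e): e is already an Int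
    -- origin(k): trace k backwards through the transpositions (a, js[a]), last to first
    let origin := fun (k : Int) =>
      (PySem.List.pyRange (i - 1) 0 (-1)).foldl
        (fun (k : Int) a =>
          let j := PySem.List.pyGetD js a 0       -- js[a]: a ∈ [1, i), default unreachable
          if k = a then j else if k = j then a else k)
        k
    -- ''.join(t[origin(k)] for k in range(i)); origin(k) provably in range, default unreachable
    String.ofList ((PySem.List.pyRange 0 i 1).map
      (fun k => PySem.List.pyGetD t.toList (origin k) ' '))

-- ===== PRECONDITION & SPEC =====
def Spec_vk_s (t : String) (e : Int) (out : String) : Prop := out = vk_s_alt t e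
instance (t : String) (e : Int) (out : String) : Decidable (Spec_vk_s t e out) := by unfold Spec_vk_s; infer_instance

-- ===== CLAIM (what is proved, stated in full; the proofs are below) =====
def Claim_equal_vk_s : Prop := ∀ (t : String) (e : Int), Dom_vk_s t e → Spec_vk_s t e (vk_s t e)

-- ===== LEMMAS AND PROOFS =====

-- the recurrence step: e = (i*(a+1) ^ e + a) % i
def pvF (i e a : Int) : Int := PySem.Int.mod (PySem.Int.bxor (i * (a + 1)) (e + a)) i

-- pvE i e k = the e-value after k iterations of the child loop (a = i-1, i-2, …)
def pvE (i e : Int) : Nat → Int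
  | 0 => e
  | k + 1 => pvF i (pvE i e k) (i - 1 - (k : Int))

-- partner index of step a, as a natural number
def pvJ (n : Nat) (e : Int) (a : Nat) : Nat := (pvE (n : Int) e (a + 1)).toNat

-- the transposition of step a, as a function on positions
def pvTau (n : Nat) (e : Int) (a k : Nat) : Nat :=
  if k = a then pvJ n e a else if k = pvJ n e a then a else k

-- pvChase n e m k = the input position whose character ends at position k after steps 1..m
def pvChase (n : Nat) (e : Int) : Nat → Nat → Nat
  | 0, k => k
  | m + 1, k => pvChase n e m (pvTau n e (m + 1) k)

-- A's loop step, with o already rewritten to the child's characterisation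
def pvStepA (n : Nat) (e : Int) : List Char → Int → List Char :=
  fun tl a =>
    let j := PySem.List.pyGetD (((List.range n).map (fun k => pvE (n : Int) e (k + 1))).reverse)
              ((n : Int) - 1 - a) 0
    let c := PySem.List.pyGetD tl a ' '
    let p := pvSplice tl j 1 c
    PySem.List.pySetD p.1 a (PySem.List.pyGetD p.2 0 ' ')

-- the pure swap form of A's loop step (list component paired with the running e)
def pvStepB (n : Nat) : (List Char × Int) → Int → (List Char × Int) :=
  fun s k =>
    let e' := PySem.Int.mod (PySem.Int.bxor ((n : Int) * ((n : Int) - k)) (s.2 + ((n : Int) - 1 - k))) (n : Int)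
    let x := PySem.List.pyGetD s.1 e' ' '
    let y := PySem.List.pyGetD s.1 k ' '
    (PySem.List.pySetD (PySem.List.pySetD s.1 k x) e' y, e')

lemma pvE_nonneg (i e : Int) (hi : 0 < i) (k : Nat) : 0 ≤ pvE i e (k + 1) :=
  PySem.Int.mod_nonneg _ hi

lemma pvE_lt (i e : Int) (hi : 0 < i) (k : Nat) : pvE i e (k + 1) < i :=
  PySem.Int.mod_lt _ hi

lemma pvJ_lt (n : Nat) (e : Int) (hn : 0 < n) (a : Nat) : pvJ n e a < n := by
  have h := pvE_lt (n : Int) e (by exact_mod_cast hn) a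
  unfold pvJ; omega

lemma pvTau_lt (n : Nat) (e : Int) (hn : 0 < n) (a k : Nat) (ha : a < n) (hk : k < n) :
    pvTau n e a k < n := by
  unfold pvTau
  split_ifs with h1 h2
  · exact pvJ_lt n e hn a
  · exact ha
  · exact hk

lemma child_fold (i e : Int) (m : Nat) :
    ((List.range m).map (fun k : Nat => i - 1 - (k : Int))).foldl
      (fun (s : List Int × Int) a =>
        (s.1 ++ [PySem.Int.mod (PySem.Int.bxor (i * (a + 1)) (s.2 + a)) i],
         PySem.Int.mod (PySem.Int.bxor (i * (a + 1)) (s.2 + a)) i))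
      ([], e)
    = ((List.range m).map (fun k : Nat => pvE i e (k + 1)), pvE i e m) := by
  induction m with
  | zero => simp [pvE]
  | succ m ih =>
      rw [List.range_succ, List.map_append, List.foldl_append, ih]
      simp [pvE, pvF]

lemma child_spec (t : String) (e : Int) (n : Nat) (hn : t.toList.length = n) (hpos : 0 < n) :
    vk_s_child t e = ((List.range n).map (fun k : Nat => pvE (n : Int) e (k + 1))).reverse := by
  have hi : PySem.Str.len t = (n : Int) := by rw [PySem.Str.len_eq, hn]
  have hne : ((n : Int)) ≠ 0 := by exact_mod_cast hpos.ne'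
  unfold vk_s_child
  rw [hi, if_neg hne]
  have hrange : PySem.List.pyRange ((n : Int) - 1) (-1) (-1)
      = (List.range n).map (fun k : Nat => (n : Int) - 1 - (k : Int)) := by
    rw [PySem.List.pyRange_neg_one]
    have h1 : ((n : Int) - 1 - (-1)).toNat = n := by omega
    rw [h1]
  rw [hrange, child_fold]
  simp [PySem.List.slice?_none_none_neg_one]

-- the splice-then-assign step equals the two-sets swap step
lemma splice_step_eq_swap (tl : List Char) (an jn : Nat) (ha : an < tl.length) (hj : jn < tl.length) :
    PySem.List.pySetD
      (PySem.List.slice tl none (some (jn : Int)) ++ [PySem.List.pyGetD tl (an : Int) ' ']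
        ++ PySem.List.slice tl (some ((jn : Int) + 1)) none)
      (an : Int)
      (PySem.List.pyGetD (PySem.List.slice tl (some (jn : Int)) (some ((jn : Int) + 1))) 0 ' ')
    = PySem.List.pySetD (PySem.List.pySetD tl (an : Int) (PySem.List.pyGetD tl (jn : Int) ' '))
        (jn : Int) (PySem.List.pyGetD tl (an : Int) ' ') := by
  have hyl : PySem.List.slice tl (some (jn : Int)) (some ((jn : Int) + 1)) = [tl[jn]] := by
    have h := PySem.List.slice_natCast_add tl jn 1
    rw [List.drop_eq_getElem_cons hj] at h
    rw [show ((jn : Int) + ((1 : Nat) : Int)) = (jn : Int) + 1 from by norm_num] at h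
    rw [h]
    rfl
  have h1 : ((jn : Int) + 1) = ((jn + 1 : Nat) : Int) := by push_cast; ring
  have hfrom : PySem.List.slice tl (some ((jn : Int) + 1)) none = List.drop (jn + 1) tl := by
    rw [h1]; exact PySem.List.slice_from_natCast tl (jn + 1)
  rw [hyl, hfrom, PySem.List.slice_to_natCast]
  simp only [PySem.List.pyGetD_natCast, PySem.List.pySetD_natCast, PySem.List.pyGetD_zero]
  have hga : tl.getD an ' ' = tl[an] := List.getD_eq_getElem tl ' ' ha
  have hgj : tl.getD jn ' ' = tl[jn] := List.getD_eq_getElem tl ' ' hj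
  have hgy : [tl[jn]].getD 0 ' ' = tl[jn] := rfl
  rw [hga, hgj, hgy]
  have hset : tl.take jn ++ [tl[an]] ++ tl.drop (jn + 1) = tl.set jn tl[an] := by
    rw [List.set_eq_take_append_cons_drop, if_pos hj]
    simp
  rw [hset]
  by_cases hc : an = jn
  · subst hc
    simp
  · rw [List.set_comm _ _ hc]

-- looking up o[i-1-a] for a = 1+m in the reversed child list gives pvE (m+2)
lemma o_lookup (n : Nat) (e : Int) (m : Nat) (hm : m + 1 < n) :
    PySem.List.pyGetD (((List.range n).map (fun k : Nat => pvE (n : Int) e (k + 1))).reverse)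
      ((n : Int) - 1 - (1 + (m : Int))) 0 = pvE (n : Int) e (m + 2) := by
  have hidx : (n : Int) - 1 - (1 + (m : Int)) = ((n - 2 - m : Nat) : Int) := by omega
  rw [hidx, PySem.List.pyGetD_natCast]
  have hlen : (((List.range n).map (fun k : Nat => pvE (n : Int) e (k + 1))).reverse).length = n := by
    simp
  have hlt : n - 2 - m < n := by omega
  rw [List.getD_eq_getElem _ _ (by rw [hlen]; exact hlt)]
  rw [List.getElem_reverse]
  have h2 : (((List.range n).map (fun k : Nat => pvE (n : Int) e (k + 1))).length) - 1 - (n - 2 - m) = m + 1 := by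
    simp; omega
  simp only [h2]
  rw [List.getElem_map, List.getElem_range]

-- invariant of the main loop: equal lists, B's e-component is pvE (m+1), length stays n
lemma main_fold (n : Nat) (hn : 0 < n) (e : Int) (l0 : List Char) (hl : l0.length = n) :
    ∀ m, m ≤ n - 1 →
      ((List.range m).map (fun k : Nat => (1 : Int) + (k : Int))).foldl (pvStepA n e) l0
        = (((List.range m).map (fun k : Nat => (1 : Int) + (k : Int))).foldl (pvStepB n) (l0, pvE (n : Int) e 1)).1
      ∧ (((List.range m).map (fun k : Nat => (1 : Int) + (k : Int))).foldl (pvStepB n) (l0, pvE (n : Int) e 1)).2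
          = pvE (n : Int) e (m + 1)
      ∧ (((List.range m).map (fun k : Nat => (1 : Int) + (k : Int))).foldl (pvStepA n e) l0).length = n := by
  intro m
  induction m with
  | zero => intro _; exact ⟨rfl, rfl, hl⟩
  | succ m ih =>
    intro hm
    obtain ⟨h1, h2, h3⟩ := ih (by omega)
    simp only [List.range_succ, List.map_append, List.foldl_append, List.map_cons, List.map_nil,
      List.foldl_cons, List.foldl_nil]
    set TL := ((List.range m).map (fun k : Nat => (1 : Int) + (k : Int))).foldl (pvStepA n e) l0 with hTL
    have hB : ((List.range m).map (fun k : Nat => (1 : Int) + (k : Int))).foldl (pvStepB n) (l0, pvE (n : Int) e 1)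
        = (TL, pvE (n : Int) e (m + 1)) := by
      rw [Prod.ext_iff]; exact ⟨h1.symm, h2⟩
    rw [hB]
    have hipos : (0 : Int) < (n : Int) := by exact_mod_cast hn
    have hmlt : m + 1 < n := by omega
    have hj : PySem.List.pyGetD (((List.range n).map (fun k : Nat => pvE (n : Int) e (k + 1))).reverse)
        ((n : Int) - 1 - (1 + (m : Int))) 0 = pvE (n : Int) e (m + 2) := o_lookup n e m hmlt
    have hj0 : 0 ≤ pvE (n : Int) e (m + 2) := pvE_nonneg _ _ hipos _
    have hjlt : pvE (n : Int) e (m + 2) < (n : Int) := pvE_lt _ _ hipos _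
    have hjcast : (((pvE (n : Int) e (m + 2)).toNat : Nat) : Int) = pvE (n : Int) e (m + 2) :=
      Int.toNat_of_nonneg hj0
    have hjn : (pvE (n : Int) e (m + 2)).toNat < n := by omega
    have hacast : ((1 : Int) + (m : Int)) = (((m + 1 : Nat)) : Int) := by push_cast; ring
    have he' : PySem.Int.mod (PySem.Int.bxor ((n : Int) * ((n : Int) - ((1 : Int) + (m : Int))))
        (pvE (n : Int) e (m + 1) + ((n : Int) - 1 - ((1 : Int) + (m : Int))))) (n : Int)
        = pvE (n : Int) e (m + 2) := by
      have e1 : (n : Int) - ((1 : Int) + (m : Int)) = ((n : Int) - 1 - ((m + 1 : Nat) : Int)) + 1 := by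
        push_cast; ring
      have e2 : (n : Int) - 1 - ((1 : Int) + (m : Int)) = (n : Int) - 1 - ((m + 1 : Nat) : Int) := by
        push_cast; ring
      rw [e1, e2]; rfl
    have hswap := splice_step_eq_swap TL (m + 1) (pvE (n : Int) e (m + 2)).toNat
      (by rw [h3]; exact hmlt) (by rw [h3]; exact hjn)
    have hstep : pvStepA n e TL ((1 : Int) + (m : Int))
        = (pvStepB n (TL, pvE (n : Int) e (m + 1)) ((1 : Int) + (m : Int))).1 := by
      simp only [pvStepA, pvStepB, pvSplice, hj, he']
      rw [hacast, ← hjcast]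
      exact hswap
    refine ⟨hstep, ?_, ?_⟩
    · simp only [pvStepB, he']
    · rw [hstep]
      simp only [pvStepB, PySem.List.length_pySetD, h3]

-- reading position k of the swap-fold list gathers l0 at the chased position
lemma swap_gather (n : Nat) (hn : 0 < n) (e : Int) (l0 : List Char) (hl : l0.length = n) :
    ∀ m, m ≤ n - 1 → ∀ k, k < n →
      ((((List.range m).map (fun k : Nat => (1 : Int) + (k : Int))).foldl (pvStepB n) (l0, pvE (n : Int) e 1)).1).getD k ' '
        = l0.getD (pvChase n e m k) ' ' := by
  intro m
  induction m with
  | zero => intro _ k _; rfl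
  | succ m ih =>
    intro hm k hk
    obtain ⟨h1, h2, h3⟩ := main_fold n hn e l0 hl m (by omega)
    simp only [List.range_succ, List.map_append, List.foldl_append, List.map_cons, List.map_nil,
      List.foldl_cons, List.foldl_nil]
    set S := ((List.range m).map (fun k : Nat => (1 : Int) + (k : Int))).foldl (pvStepB n) (l0, pvE (n : Int) e 1) with hS
    have hL : S.1.length = n := by rw [← h1]; exact h3
    have hipos : (0 : Int) < (n : Int) := by exact_mod_cast hn
    have hj0 : 0 ≤ pvE (n : Int) e (m + 2) := pvE_nonneg _ _ hipos _
    have hjcast : (((pvE (n : Int) e (m + 2)).toNat : Nat) : Int) = pvE (n : Int) e (m + 2) :=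
      Int.toNat_of_nonneg hj0
    have hjn : pvJ n e (m + 1) < n := pvJ_lt n e hn (m + 1)
    have hacast : ((1 : Int) + (m : Int)) = (((m + 1 : Nat)) : Int) := by push_cast; ring
    have hjdef : pvE (n : Int) e (m + 2) = ((pvJ n e (m + 1) : Nat) : Int) := hjcast.symm
    have he2 : PySem.Int.mod (PySem.Int.bxor ((n : Int) * ((n : Int) - ((m + 1 : Nat) : Int)))
        (S.2 + ((n : Int) - 1 - ((m + 1 : Nat) : Int)))) (n : Int)
        = ((pvJ n e (m + 1) : Nat) : Int) := by
      rw [h2, ← hjdef]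
      have e1 : (n : Int) - ((m + 1 : Nat) : Int) = ((n : Int) - 1 - ((m + 1 : Nat) : Int)) + 1 := by
        push_cast; ring
      rw [e1]; rfl
    -- evaluate the step's list at position k
    have hstep : ((pvStepB n S ((1 : Int) + (m : Int))).1).getD k ' '
        = S.1.getD (pvTau n e (m + 1) k) ' ' := by
      simp only [pvStepB, hacast, he2]
      have hsetlen : (PySem.List.pySetD S.1 ((((m + 1 : Nat)) : Int)) (PySem.List.pyGetD S.1 ((pvJ n e (m + 1) : Nat) : Int) ' ')).length = n := by
        rw [PySem.List.length_pySetD]; exact hL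
      have e3 := PySem.List.pyGetD_pySetD_natCast
        (PySem.List.pySetD S.1 ((((m + 1 : Nat)) : Int)) (PySem.List.pyGetD S.1 ((pvJ n e (m + 1) : Nat) : Int) ' '))
        (pvJ n e (m + 1)) k (PySem.List.pyGetD S.1 ((((m + 1 : Nat)) : Int)) ' ') ' '
        (by rw [hsetlen]; exact hjn)
      rw [← PySem.List.pyGetD_natCast _ k ' ', e3]
      have e4 := PySem.List.pyGetD_pySetD_natCast S.1 (m + 1) k
        (PySem.List.pyGetD S.1 ((pvJ n e (m + 1) : Nat) : Int) ' ') ' ' (by rw [hL]; omega)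
      rw [e4]
      simp only [PySem.List.pyGetD_natCast]
      unfold pvTau
      rcases eq_or_ne k (m + 1) with hka | hka <;> rcases eq_or_ne k (pvJ n e (m + 1)) with hkj | hkj
      · rw [if_pos hkj, if_pos hka, ← hkj, hka]
      · rw [if_neg hkj, if_pos hka, if_pos hka]
      · rw [if_pos hkj, if_neg hka, if_pos hkj]
      · rw [if_neg hkj, if_neg hka, if_neg hka, if_neg hkj]
    rw [hstep, ih (by omega) _ (pvTau_lt n e hn (m + 1) k (by omega) hk)]
    rfl

-- the full swap fold equals a single gather through pvChase
lemma swap_fold_eq_gather (n : Nat) (hn : 0 < n) (e : Int) (l0 : List Char) (hl : l0.length = n) :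
    (((List.range (n - 1)).map (fun k : Nat => (1 : Int) + (k : Int))).foldl (pvStepB n) (l0, pvE (n : Int) e 1)).1
      = (List.range n).map (fun k => l0.getD (pvChase n e (n - 1) k) ' ') := by
  obtain ⟨h1, _, h3⟩ := main_fold n hn e l0 hl (n - 1) le_rfl
  have hlen : ((((List.range (n - 1)).map (fun k : Nat => (1 : Int) + (k : Int))).foldl (pvStepB n) (l0, pvE (n : Int) e 1)).1).length = n := by
    rw [← h1]; exact h3
  apply List.ext_getElem
  · rw [hlen]; simp
  · intro i hi hi'
    have hin : i < n := by rw [hlen] at hi; exact hi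
    have := swap_gather n hn e l0 hl (n - 1) le_rfl i hin
    rw [List.getD_eq_getElem _ _ hi] at this
    rw [this]
    rw [List.getElem_map, List.getElem_range]

-- B's key-schedule fold produces the same pvE sequence
lemma js_fold (i e : Int) (m : Nat) :
    ((List.range m).map (fun k : Nat => (k : Int))).foldl
      (fun (s : List Int × Int) a =>
        (s.1 ++ [PySem.Int.mod (PySem.Int.bxor (i * (i - a)) (s.2 + (i - 1 - a))) i],
         PySem.Int.mod (PySem.Int.bxor (i * (i - a)) (s.2 + (i - 1 - a))) i))
      ([], e)
    = ((List.range m).map (fun k : Nat => pvE i e (k + 1)), pvE i e m) := by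
  induction m with
  | zero => simp [pvE]
  | succ m ih =>
      rw [List.range_succ, List.map_append, List.foldl_append, ih]
      have h : PySem.Int.mod (PySem.Int.bxor (i * (i - (m : Int))) (pvE i e m + (i - 1 - (m : Int)))) i
          = pvE i e (m + 1) := by
        show _ = pvF i (pvE i e m) (i - 1 - (m : Int))
        unfold pvF
        have : i * (i - (m : Int)) = i * ((i - 1 - (m : Int)) + 1) := by ring
        rw [this]
      simp [h]
  -- (induction identical in shape to child_fold, with the generation index running upward)

lemma js_lookup (n : Nat) (e : Int) (a : Nat) (ha : a < n) :
    PySem.List.pyGetD ((List.range n).map (fun k : Nat => pvE (n : Int) e (k + 1))) ((a : Nat) : Int) 0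
      = pvE (n : Int) e (a + 1) := by
  rw [PySem.List.pyGetD_natCast]
  rw [List.getD_eq_getElem _ _ (by simpa using ha)]
  rw [List.getElem_map, List.getElem_range]

-- B's backward trace computes pvChase
lemma origin_fold (n : Nat) (hn : 0 < n) (e : Int) :
    ∀ m, m ≤ n - 1 → ∀ k : Nat, k < n →
      (PySem.List.pyRange ((m : Nat) : Int) 0 (-1)).foldl
        (fun (k : Int) a =>
          let j := PySem.List.pyGetD ((List.range n).map (fun k : Nat => pvE (n : Int) e (k + 1))) a 0
          if k = a then j else if k = j then a else k)
        ((k : Nat) : Int)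
      = ((pvChase n e m k : Nat) : Int) := by
  intro m
  induction m with
  | zero =>
      intro _ k _
      rw [PySem.List.pyRange_neg_one_eq_nil (by norm_num)]
      rfl
  | succ m ih =>
      intro hm k hk
      have hcons : PySem.List.pyRange (((m + 1 : Nat)) : Int) 0 (-1)
          = (((m + 1 : Nat)) : Int) :: PySem.List.pyRange (((m : Nat)) : Int) 0 (-1) := by
        rw [PySem.List.pyRange_neg_one_cons (by exact_mod_cast Nat.succ_pos m)]
        norm_num
      rw [hcons, List.foldl_cons]
      have hj := js_lookup n e (m + 1) (by omega)
      have hjdef : pvE (n : Int) e (m + 2) = ((pvJ n e (m + 1) : Nat) : Int) := by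
        have hipos : (0 : Int) < (n : Int) := by exact_mod_cast hn
        exact (Int.toNat_of_nonneg (pvE_nonneg (n : Int) e hipos (m + 1))).symm
      have hstate : (if ((k : Nat) : Int) = (((m + 1 : Nat)) : Int)
            then PySem.List.pyGetD ((List.range n).map (fun k : Nat => pvE (n : Int) e (k + 1))) (((m + 1 : Nat)) : Int) 0
            else if ((k : Nat) : Int) = PySem.List.pyGetD ((List.range n).map (fun k : Nat => pvE (n : Int) e (k + 1))) (((m + 1 : Nat)) : Int) 0
              then (((m + 1 : Nat)) : Int) else ((k : Nat) : Int))
          = ((pvTau n e (m + 1) k : Nat) : Int) := by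
        rw [hj, hjdef]
        unfold pvTau
        by_cases hka : k = m + 1
        · rw [if_pos (by exact_mod_cast hka), if_pos hka]
        · rw [if_neg (by exact_mod_cast hka), if_neg hka]
          by_cases hkj : k = pvJ n e (m + 1)
          · rw [if_pos (by exact_mod_cast hkj), if_pos hkj]
          · rw [if_neg (by exact_mod_cast hkj), if_neg hkj]
      simp only [hstate]
      exact ih (by omega) _ (pvTau_lt n e hn (m + 1) k (by omega) hk)

theorem vk_s_eq_alt (t : String) (e : Int) : vk_s t e = vk_s_alt t e := by
  rcases Nat.eq_zero_or_pos t.toList.length with h0 | hpos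
  · have hi : PySem.Str.len t = 0 := by rw [PySem.Str.len_eq, h0]; rfl
    unfold vk_s vk_s_alt
    simp only [hi]
    norm_num
  · set n := t.toList.length with hn
    have hi : PySem.Str.len t = (n : Int) := PySem.Str.len_eq t
    have hne : ((n : Int)) ≠ 0 := by exact_mod_cast hpos.ne'
    have hipos : (0 : Int) < (n : Int) := by exact_mod_cast hpos
    -- A's side: fold of splice steps = swap fold = gather through pvChase
    have hA : vk_s t e
        = String.ofList ((List.range n).map (fun k => t.toList.getD (pvChase n e (n - 1) k) ' ')) := by
      unfold vk_s
      simp only [hi, if_neg hne, child_spec t e n rfl hpos]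
      rw [PySem.List.pyRange_one]
      have hcnt : ((n : Int) - 1).toNat = n - 1 := by omega
      rw [hcnt]
      show String.ofList (((List.range (n - 1)).map (fun k : Nat => (1 : Int) + (k : Int))).foldl (pvStepA n e) t.toList) = _
      rw [(main_fold n hpos e t.toList rfl (n - 1) le_rfl).1, swap_fold_eq_gather n hpos e t.toList rfl]
    -- B's side: schedule + trace = the same gather
    have hB : vk_s_alt t e
        = String.ofList ((List.range n).map (fun k => t.toList.getD (pvChase n e (n - 1) k) ' ')) := by
      unfold vk_s_alt
      simp only [hi, if_neg hne]
      rw [PySem.List.pyRange_one 0 (n : Int)]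
      have hcnt : ((n : Int) - 0).toNat = n := by omega
      rw [hcnt]
      have hmap0 : (List.range n).map (fun k : Nat => (0 : Int) + (k : Int))
          = (List.range n).map (fun k : Nat => ((k : Nat) : Int)) := by
        apply List.map_congr_left; intro a _; ring
      rw [hmap0, congrArg Prod.fst (js_fold (n : Int) e n), List.map_map]
      apply congrArg String.ofList
      apply List.map_congr_left
      intro k hk
      have hkn : k < n := List.mem_range.mp hk
      simp only [Function.comp]
      have hstart : (n : Int) - 1 = (((n - 1 : Nat)) : Int) := by omega
      rw [hstart, origin_fold n hpos e (n - 1) le_rfl k hkn]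
      rw [PySem.List.pyGetD_natCast]
  -- both ports reduce to the same gather
    rw [hA, hB]

-- ===== VERDICT (by name: the statement is the Claim_ definition above) =====
theorem vk_s_spec : Claim_equal_vk_s := by
  intro t e _
  unfold Spec_vk_s
  exact vk_s_eq_alt t e
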